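-- pv_equiv track=rewrite | github.com/Mahaveer143s/LocalPulse-AI | app.py | get_free_high_demand_areas
-- ===== SOURCE A (Python) =====
-- def get_free_high_demand_areas(city: str, business_type: str, count: int) -> list[str]:
--     known_areas = {
--         "hyderabad": [
--             "Madhapur",
--             "Gachibowli",
--             "Kondapur",
--             "HITEC City",
--             "Jubilee Hills",
--             "Banjara Hills",
--             "Kukatpally",
--             "Miyapur",
--             "Manikonda",
--             "Financial District",
--             "Begumpet",
--             "Ameerpet",
--         ],
--         "vijayawada": [
--             "Benz Circle",
--             "Governorpet",
--             "Patamata",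
--             "Auto Nagar",
--             "Moghalrajpuram",
--             "Labbipet",
--             "Kanuru",
--             "Poranki",
--         ],
--         "bengaluru": [
--             "Whitefield",
--             "Indiranagar",
--             "Koramangala",
--             "HSR Layout",
--             "Jayanagar",
--             "Marathahalli",
--             "Electronic City",
--             "Yelahanka",
--             "Hebbal",
--             "JP Nagar",
--         ],
--         "bangalore": [
--             "Whitefield",
--             "Indiranagar",
--             "Koramangala",
--             "HSR Layout",
--             "Jayanagar",
--             "Marathahalli",
--             "Electronic City",
--             "Yelahanka",
--             "Hebbal",
--             "JP Nagar",
--         ],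
--     }
--     generic_areas = [
--         "Central Business District",
--         "Main Market",
--         "Commercial Street",
--         "Industrial Area",
--         "Tech Park",
--         "Residential Growth Corridor",
--         "Ring Road",
--         "New Township",
--         "Railway Station Area",
--         "Bus Stand Area",
--     ]
--     areas = known_areas.get(city.lower().strip(), generic_areas)
--
--     if business_type in {"Web Development", "Interior Designers"}:
--         priority_words = ("Tech", "HITEC", "Financial", "Business", "Commercial")
--         areas = sorted(areas, key=lambda area: not any(word.lower() in area.lower() for word in priority_words))
--     elif business_type in {"Builders", "Construction", "Real Estate"}:
--         priority_words = ("Growth", "Township", "Ring", "Financial", "Kondapur", "Whitefield", "Miyapur")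
--         areas = sorted(areas, key=lambda area: not any(word.lower() in area.lower() for word in priority_words))
--
--     return areas[:count]
-- ===== SOURCE B (Python) =====
-- def get_free_high_demand_areas(city: str, business_type: str, count: int) -> list[str]:
--     known_areas = {
--         "hyderabad": [
--             "Madhapur", "Gachibowli", "Kondapur", "HITEC City", "Jubilee Hills",
--             "Banjara Hills", "Kukatpally", "Miyapur", "Manikonda",
--             "Financial District", "Begumpet", "Ameerpet",
--         ],
--         "vijayawada": [
--             "Benz Circle", "Governorpet", "Patamata", "Auto Nagar",
--             "Moghalrajpuram", "Labbipet", "Kanuru", "Poranki",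
--         ],
--         "bengaluru": [
--             "Whitefield", "Indiranagar", "Koramangala", "HSR Layout", "Jayanagar",
--             "Marathahalli", "Electronic City", "Yelahanka", "Hebbal", "JP Nagar",
--         ],
--         "bangalore": [
--             "Whitefield", "Indiranagar", "Koramangala", "HSR Layout", "Jayanagar",
--             "Marathahalli", "Electronic City", "Yelahanka", "Hebbal", "JP Nagar",
--         ],
--     }
--     generic_areas = [
--         "Central Business District", "Main Market", "Commercial Street",
--         "Industrial Area", "Tech Park", "Residential Growth Corridor",
--         "Ring Road", "New Township", "Railway Station Area", "Bus Stand Area",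
--     ]
--     areas = known_areas.get(city.lower().strip(), generic_areas)
--
--     if business_type in ("Web Development", "Interior Designers"):
--         priority_words = ("Tech", "HITEC", "Financial", "Business", "Commercial")
--     elif business_type in ("Builders", "Construction", "Real Estate"):
--         priority_words = ("Growth", "Township", "Ring", "Financial", "Kondapur", "Whitefield", "Miyapur")
--     else:
--         priority_words = None
--
--     if priority_words is not None:
--         priority, rest = [], []
--         for area in areas:
--             if any(word.lower() in area.lower() for word in priority_words):
--                 priority.append(area)
--             else:
--                 rest.append(area)
--         areas = priority + rest
--
--     return areas[:count]
-- ===== Notes on version B (the rewrite author's own statement) =====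
-- stated objective: simpler
-- what changed: Replaces the boolean-keyed stable sort with a single partition pass that appends each area to a 'priority' or 'rest' list and concatenates them, selecting the priority-word tuple once instead of sorting in each branch.
import Mathlib
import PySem

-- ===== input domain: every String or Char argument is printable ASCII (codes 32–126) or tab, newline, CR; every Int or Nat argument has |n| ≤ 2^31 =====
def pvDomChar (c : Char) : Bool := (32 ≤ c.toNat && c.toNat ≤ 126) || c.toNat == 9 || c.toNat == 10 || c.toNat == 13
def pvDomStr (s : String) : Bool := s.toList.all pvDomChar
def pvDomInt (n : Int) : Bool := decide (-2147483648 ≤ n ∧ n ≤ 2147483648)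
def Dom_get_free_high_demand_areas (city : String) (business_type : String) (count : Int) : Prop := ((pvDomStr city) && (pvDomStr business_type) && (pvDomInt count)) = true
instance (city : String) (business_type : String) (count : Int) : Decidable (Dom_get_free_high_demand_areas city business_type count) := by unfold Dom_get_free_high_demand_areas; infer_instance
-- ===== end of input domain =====

-- B replaces the stable boolean-keyed sort with a single partition pass (priority ++ rest): simpler, same result.

-- shared literal tables (the same constants appear verbatim in both Pythons)
def pvHyd : List String :=
  ["Madhapur", "Gachibowli", "Kondapur", "HITEC City", "Jubilee Hills", "Banjara Hills",
   "Kukatpally", "Miyapur", "Manikonda", "Financial District", "Begumpet", "Ameerpet"]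
def pvVij : List String :=
  ["Benz Circle", "Governorpet", "Patamata", "Auto Nagar", "Moghalrajpuram", "Labbipet",
   "Kanuru", "Poranki"]
def pvBlr : List String :=
  ["Whitefield", "Indiranagar", "Koramangala", "HSR Layout", "Jayanagar", "Marathahalli",
   "Electronic City", "Yelahanka", "Hebbal", "JP Nagar"]
def pvKnown : PySem.Dict String (List String) :=
  PySem.Dict.mk [("hyderabad", pvHyd), ("vijayawada", pvVij), ("bengaluru", pvBlr), ("bangalore", pvBlr)]
def pvGeneric : List String :=
  ["Central Business District", "Main Market", "Commercial Street", "Industrial Area",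
   "Tech Park", "Residential Growth Corridor", "Ring Road", "New Township",
   "Railway Station Area", "Bus Stand Area"]
def pvWordsWeb : List String := ["Tech", "HITEC", "Financial", "Business", "Commercial"]
def pvWordsBuild : List String := ["Growth", "Township", "Ring", "Financial", "Kondapur", "Whitefield", "Miyapur"]

-- ===== PORT A =====
def get_free_high_demand_areas (city : String) (business_type : String) (count : Int) : List String :=
  let areas := (PySem.Dict.get? pvKnown (PySem.Str.strip (PySem.Str.lower city))).getD pvGeneric
  let areas :=
    if business_type == "Web Development" || business_type == "Interior Designers" then
      PySem.List.sorted areas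
        (fun area => !(pvWordsWeb.any (fun word => PySem.Str.isIn (PySem.Str.lower word) (PySem.Str.lower area)))) false
    else if business_type == "Builders" || business_type == "Construction" || business_type == "Real Estate" then
      PySem.List.sorted areas
        (fun area => !(pvWordsBuild.any (fun word => PySem.Str.isIn (PySem.Str.lower word) (PySem.Str.lower area)))) false
    else areas
  PySem.List.slice areas none (some count)

-- ===== PORT B =====
def pvMatches (words : List String) (area : String) : Bool :=
  words.any (fun word => PySem.Str.isIn (PySem.Str.lower word) (PySem.Str.lower area))

def pvPartition (words : List String) (areas : List String) : List String × List String :=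
  areas.foldl (fun acc area =>
    if pvMatches words area then (acc.1 ++ [area], acc.2) else (acc.1, acc.2 ++ [area])) ([], [])

def get_free_high_demand_areas_alt (city : String) (business_type : String) (count : Int) : List String :=
  let areas := (PySem.Dict.get? pvKnown (PySem.Str.strip (PySem.Str.lower city))).getD pvGeneric
  let words? : Option (List String) :=
    if business_type == "Web Development" || business_type == "Interior Designers" then some pvWordsWeb
    else if business_type == "Builders" || business_type == "Construction" || business_type == "Real Estate" then some pvWordsBuild
    else none
  let areas :=
    match words? with
    | none => areas
    | some words => let pr := pvPartition words areas; pr.1 ++ pr.2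
  PySem.List.slice areas none (some count)

-- ===== PRECONDITION & SPEC =====
def Spec_get_free_high_demand_areas (city : String) (business_type : String) (count : Int) (out : List String) : Prop := out = get_free_high_demand_areas_alt city business_type count
instance (city : String) (business_type : String) (count : Int) (out : List String) : Decidable (Spec_get_free_high_demand_areas city business_type count out) := by unfold Spec_get_free_high_demand_areas; infer_instance

-- ===== CLAIM (what is proved, stated in full; the proofs are below) =====
def Claim_equal_get_free_high_demand_areas : Prop := ∀ (city : String) (business_type : String) (count : Int), Dom_get_free_high_demand_areas city business_type count → Spec_get_free_high_demand_areas city business_type count (get_free_high_demand_areas city business_type count)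

-- ===== LEMMAS AND PROOFS =====

-- the looked-up area list is always one of the four literal lists
lemma pvAreas_cases (k : String) :
    ((PySem.Dict.get? pvKnown k).getD pvGeneric) = pvHyd ∨
    ((PySem.Dict.get? pvKnown k).getD pvGeneric) = pvVij ∨
    ((PySem.Dict.get? pvKnown k).getD pvGeneric) = pvBlr ∨
    ((PySem.Dict.get? pvKnown k).getD pvGeneric) = pvGeneric := by
  by_cases h1 : ("hyderabad" == k) <;> by_cases h2 : ("vijayawada" == k) <;>
    by_cases h3 : ("bengaluru" == k) <;> by_cases h4 : ("bangalore" == k) <;>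
    simp [pvKnown, h1, h2, h3, h4, PySem.Dict.get?]

-- on each concrete area list, the stable boolean-keyed sort equals the partition pass
lemma pvSortPart (areas words : List String)
    (ha : areas = pvHyd ∨ areas = pvVij ∨ areas = pvBlr ∨ areas = pvGeneric)
    (hw : words = pvWordsWeb ∨ words = pvWordsBuild) :
    PySem.List.sorted areas (fun area => !(pvMatches words area)) false =
      (pvPartition words areas).1 ++ (pvPartition words areas).2 := by
  rcases ha with h | h | h | h <;> rcases hw with hw | hw <;> subst h <;> subst hw <;> decide

-- ===== VERDICT (by name: the statement is the Claim_ definition above) =====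
theorem get_free_high_demand_areas_spec : Claim_equal_get_free_high_demand_areas := by
  intro city bt count _
  unfold Spec_get_free_high_demand_areas get_free_high_demand_areas get_free_high_demand_areas_alt
  have ha := pvAreas_cases (PySem.Str.strip (PySem.Str.lower city))
  by_cases h1 : (bt == "Web Development" || bt == "Interior Designers")
  · simp only [h1, if_pos]
    exact congrArg (fun l => PySem.List.slice l none (some count))
      (by simpa [pvMatches] using pvSortPart _ pvWordsWeb ha (Or.inl rfl))
  · simp only [h1, if_neg, Bool.false_eq_true, not_false_iff]
    by_cases h2 : (bt == "Builders" || bt == "Construction" || bt == "Real Estate")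
    · simp only [h2, if_pos]
      exact congrArg (fun l => PySem.List.slice l none (some count))
        (by simpa [pvMatches] using pvSortPart _ pvWordsBuild ha (Or.inr rfl))
    · simp [h2]
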